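-- pv_equiv track=rewrite | github.com/hadi-rj-1999/Learning-Python | 04-data-structures/sets.py | analyze_text
-- ===== SOURCE A (Python) =====
-- def analyze_text(text):
--     """Analyze unique characters in text"""
--     all_chars = set(text)
--     letters = {char for char in all_chars if char.isalpha()}
--     digits = {char for char in all_chars if char.isdigit()}
--     punctuation = {char for char in all_chars if not char.isalnum() and not char.isspace()}
--     whitespace = {char for char in all_chars if char.isspace()}
--
--     return {
--         "all_chars": all_chars,
--         "letters": letters,
--         "digits": digits,
--         "punctuation": punctuation,
--         "whitespace": whitespace
--     }
-- ===== SOURCE B (Python) =====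
-- def analyze_text(text):
--     """Analyze unique characters in text: one streaming pass over the raw text,
--     deduplicating on the fly and classifying each new character exactly once
--     via a mutually exclusive branch chain (no set(text) pre-pass, no scans
--     over the unique-character set)."""
--     all_chars = set()
--     letters = set()
--     digits = set()
--     punctuation = set()
--     whitespace = set()
--     for char in text:
--         if char in all_chars:
--             continue
--         all_chars.add(char)
--         if char.isalpha():
--             letters.add(char)
--         elif char.isdigit():
--             digits.add(char)
--         elif char.isspace():
--             whitespace.add(char)
--         elif not char.isalnum():
--             punctuation.add(char)
--     return {
--         "all_chars": all_chars,
--         "letters": letters,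
--         "digits": digits,
--         "punctuation": punctuation,
--         "whitespace": whitespace
--     }
-- ===== Notes on version B (the rewrite author's own statement) =====
-- stated objective: alternative
-- what changed: Instead of materializing set(text) and then running four separate filtering comprehensions over it, B makes one streaming pass over the raw text, deduplicating on the fly and classifying each new character exactly once through a mutually exclusive elif chain (correct because alpha/digit/space are pairwise disjoint and both alpha and digit imply alnum).
import Mathlib
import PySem

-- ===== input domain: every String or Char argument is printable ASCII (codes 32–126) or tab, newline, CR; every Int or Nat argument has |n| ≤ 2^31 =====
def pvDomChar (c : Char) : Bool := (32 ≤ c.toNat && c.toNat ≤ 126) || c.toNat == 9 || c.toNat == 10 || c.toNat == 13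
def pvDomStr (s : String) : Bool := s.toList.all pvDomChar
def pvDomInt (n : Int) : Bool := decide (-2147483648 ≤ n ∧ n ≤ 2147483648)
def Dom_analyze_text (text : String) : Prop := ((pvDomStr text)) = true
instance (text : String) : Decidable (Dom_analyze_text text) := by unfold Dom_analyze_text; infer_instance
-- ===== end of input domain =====

-- B replaces A's set(text) pre-pass plus four filtering scans by one streaming pass over the
-- raw text with on-the-fly dedup and a mutually exclusive classification chain; objective: alternative.

-- ===== PORT A =====
def analyze_text (text : String) : List (String × List String) :=
  let all_chars : PySem.Set String := PySem.Set.ofList (text.toList.map (fun c => String.mk [c]))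
  let letters : PySem.Set String := PySem.Set.ofList (all_chars.filter (fun ch => PySem.Str.strIsalpha ch))
  let digits : PySem.Set String := PySem.Set.ofList (all_chars.filter (fun ch => PySem.Str.strIsdigit ch))
  let punctuation : PySem.Set String := PySem.Set.ofList (all_chars.filter (fun ch => !PySem.Str.strIsalnum ch && !PySem.Str.strIsspace ch))
  let whitespace : PySem.Set String := PySem.Set.ofList (all_chars.filter (fun ch => PySem.Str.strIsspace ch))
  [("all_chars", all_chars), ("letters", letters), ("digits", digits),
   ("punctuation", punctuation), ("whitespace", whitespace)]

-- ===== PORT B =====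
-- one fold over the raw character sequence: skip seen characters, otherwise add to all_chars
-- and to exactly one category via the exclusive elif chain of Source B
def pvStepB (st : PySem.Set String × PySem.Set String × PySem.Set String × PySem.Set String × PySem.Set String)
    (ch : String) :
    PySem.Set String × PySem.Set String × PySem.Set String × PySem.Set String × PySem.Set String :=
  if PySem.Set.contains st.1 ch then st
  else
    let all := PySem.Set.add st.1 ch
    if PySem.Str.strIsalpha ch then (all, PySem.Set.add st.2.1 ch, st.2.2.1, st.2.2.2.1, st.2.2.2.2)
    else if PySem.Str.strIsdigit ch then (all, st.2.1, PySem.Set.add st.2.2.1 ch, st.2.2.2.1, st.2.2.2.2)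
    else if PySem.Str.strIsspace ch then (all, st.2.1, st.2.2.1, st.2.2.2.1, PySem.Set.add st.2.2.2.2 ch)
    else if !PySem.Str.strIsalnum ch then (all, st.2.1, st.2.2.1, PySem.Set.add st.2.2.2.1 ch, st.2.2.2.2)
    else (all, st.2.1, st.2.2.1, st.2.2.2.1, st.2.2.2.2)

def analyze_text_alt (text : String) : List (String × List String) :=
  let st := (text.toList.map (fun c => String.mk [c])).foldl pvStepB
    (PySem.Set.empty, PySem.Set.empty, PySem.Set.empty, PySem.Set.empty, PySem.Set.empty)
  [("all_chars", st.1), ("letters", st.2.1), ("digits", st.2.2.1),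
   ("punctuation", st.2.2.2.1), ("whitespace", st.2.2.2.2)]

-- ===== PRECONDITION & SPEC =====
def Spec_analyze_text (text : String) (out : List (String × List String)) : Prop := out = analyze_text_alt text
instance (text : String) (out : List (String × List String)) : Decidable (Spec_analyze_text text out) := by unfold Spec_analyze_text; infer_instance

-- ===== CLAIM (what is proved, stated in full; the proofs are below) =====
def Claim_equal_analyze_text : Prop := ∀ (text : String), Dom_analyze_text text → Spec_analyze_text text (analyze_text text)

-- ===== LEMMAS AND PROOFS =====

-- character-level disjointness facts behind the exclusive chain
theorem pv_isalpha_not_isdigit (c : Char) (h : PySem.Chars.isalpha c = true) :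
    PySem.Chars.isdigit c = false := by
  simp only [PySem.Chars.isalpha, PySem.Chars.isupper, PySem.Chars.islower, PySem.Chars.isdigit,
    Char.le_def, UInt32.le_iff_toNat_le, Bool.or_eq_true, Bool.and_eq_true, decide_eq_true_eq,
    show ('A').val.toNat = 65 from rfl, show ('Z').val.toNat = 90 from rfl,
    show ('a').val.toNat = 97 from rfl, show ('z').val.toNat = 122 from rfl,
    show ('0').val.toNat = 48 from rfl, show ('9').val.toNat = 57 from rfl] at h ⊢
  simp only [Bool.and_eq_false_iff, decide_eq_false_iff_not, not_le]
  omega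

theorem pv_isalpha_not_isspace (c : Char) (h : PySem.Chars.isalpha c = true) :
    PySem.Chars.isspace c = false := by
  simp only [PySem.Chars.isalpha, PySem.Chars.isupper, PySem.Chars.islower,
    Char.le_def, UInt32.le_iff_toNat_le, Bool.or_eq_true, Bool.and_eq_true, decide_eq_true_eq,
    show ('A').val.toNat = 65 from rfl, show ('Z').val.toNat = 90 from rfl,
    show ('a').val.toNat = 97 from rfl, show ('z').val.toNat = 122 from rfl] at h
  simp only [PySem.Chars.isspace, Char.toNat, Bool.or_eq_false_iff, Bool.and_eq_false_iff,
    decide_eq_false_iff_not, not_le]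
  omega

theorem pv_isdigit_not_isspace (c : Char) (h : PySem.Chars.isdigit c = true) :
    PySem.Chars.isspace c = false := by
  simp only [PySem.Chars.isdigit, Char.le_def, UInt32.le_iff_toNat_le, Bool.and_eq_true,
    decide_eq_true_eq, show ('0').val.toNat = 48 from rfl,
    show ('9').val.toNat = 57 from rfl] at h
  simp only [PySem.Chars.isspace, Char.toNat, Bool.or_eq_false_iff, Bool.and_eq_false_iff,
    decide_eq_false_iff_not, not_le]
  omega

-- string-level packaging of those facts, for the four filter predicates
theorem pv_strIsalpha_facts (s : String) (h : PySem.Str.strIsalpha s = true) :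
    PySem.Str.strIsdigit s = false ∧ PySem.Str.strIsalnum s = true ∧ PySem.Str.strIsspace s = false := by
  simp only [PySem.Str.strIsalpha, PySem.Str.strIsdigit, PySem.Str.strIsalnum,
    PySem.Str.strIsspace] at h ⊢
  generalize s.toList = l at *
  cases l with
  | nil => simp [PySem.Chars.strIsalpha] at h
  | cons c cs =>
    simp only [PySem.Chars.strIsalpha, List.isEmpty_cons, Bool.not_false, Bool.true_and,
      List.all_cons, Bool.and_eq_true, List.all_eq_true] at h
    obtain ⟨hc, hcs⟩ := h
    refine ⟨?_, ?_, ?_⟩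
    · simp [PySem.Chars.strIsdigit, pv_isalpha_not_isdigit c hc]
    · simp only [PySem.Chars.strIsalnum, List.isEmpty_cons, Bool.not_false, Bool.true_and,
        List.all_cons, Bool.and_eq_true, List.all_eq_true]
      exact ⟨by simp [PySem.Chars.isalnum, hc], fun x hx => by simp [PySem.Chars.isalnum, hcs x hx]⟩
    · simp [PySem.Chars.strIsspace, pv_isalpha_not_isspace c hc]

theorem pv_strIsdigit_facts (s : String) (h : PySem.Str.strIsdigit s = true) :
    PySem.Str.strIsalnum s = true ∧ PySem.Str.strIsspace s = false := by
  simp only [PySem.Str.strIsdigit, PySem.Str.strIsalnum, PySem.Str.strIsspace] at h ⊢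
  generalize s.toList = l at *
  cases l with
  | nil => simp [PySem.Chars.strIsdigit] at h
  | cons c cs =>
    simp only [PySem.Chars.strIsdigit, List.isEmpty_cons, Bool.not_false, Bool.true_and,
      List.all_cons, Bool.and_eq_true, List.all_eq_true] at h
    obtain ⟨hc, hcs⟩ := h
    refine ⟨?_, ?_⟩
    · simp only [PySem.Chars.strIsalnum, List.isEmpty_cons, Bool.not_false, Bool.true_and,
        List.all_cons, Bool.and_eq_true, List.all_eq_true]
      exact ⟨by simp [PySem.Chars.isalnum, hc], fun x hx => by simp [PySem.Chars.isalnum, hcs x hx]⟩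
    · simp [PySem.Chars.strIsspace, pv_isdigit_not_isspace c hc]

-- shorthand for the parallel-filter state A's four comprehensions compute from a set S
def pvStateOf (S : PySem.Set String) :
    PySem.Set String × PySem.Set String × PySem.Set String × PySem.Set String × PySem.Set String :=
  (S, S.filter (fun ch => PySem.Str.strIsalpha ch), S.filter (fun ch => PySem.Str.strIsdigit ch),
   S.filter (fun ch => !PySem.Str.strIsalnum ch && !PySem.Str.strIsspace ch),
   S.filter (fun ch => PySem.Str.strIsspace ch))

theorem pvStepB_state (S : PySem.Set String) (ch : String) :
    pvStepB (pvStateOf S) ch = pvStateOf (PySem.Set.add S ch) := by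
  unfold pvStepB pvStateOf
  by_cases hm : ch ∈ S
  · simp [PySem.Set.add, PySem.Set.contains_eq_listContains, List.contains_eq_mem, hm]
  · have hadd : PySem.Set.add S ch = S ++ [ch] := by
      simp [PySem.Set.add, PySem.Set.contains_eq_listContains, List.contains_eq_mem, hm]
    simp only [PySem.Set.contains_eq_listContains, List.contains_eq_mem, hm, decide_false,
      Bool.false_eq_true, if_false, hadd, List.filter_append, List.filter_cons, List.filter_nil]
    by_cases hA : PySem.Chars.strIsalpha ch.toList = true
    · obtain ⟨hD, hN, hW⟩ := pv_strIsalpha_facts ch (by simp [PySem.Str.strIsalpha, hA])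
      simp only [PySem.Str.strIsdigit, PySem.Str.strIsalnum, PySem.Str.strIsspace] at hD hN hW
      simp [hA, hD, hN, hW, PySem.Set.add, PySem.Set.contains_eq_listContains,
        List.contains_eq_mem, List.mem_filter, hm]
    · by_cases hD : PySem.Chars.strIsdigit ch.toList = true
      · obtain ⟨hN, hW⟩ := pv_strIsdigit_facts ch (by simp [PySem.Str.strIsdigit, hD])
        simp only [PySem.Str.strIsalnum, PySem.Str.strIsspace] at hN hW
        simp [hA, hD, hN, hW, PySem.Set.add, PySem.Set.contains_eq_listContains,
          List.contains_eq_mem, List.mem_filter, hm]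
      · by_cases hW : PySem.Chars.strIsspace ch.toList = true
        · simp [hA, hD, hW, PySem.Set.add, PySem.Set.contains_eq_listContains,
            List.contains_eq_mem, List.mem_filter, hm]
        · by_cases hN : PySem.Chars.strIsalnum ch.toList = true
          · simp [hA, hD, hW, hN]
          · simp [hA, hD, hW, hN, PySem.Set.add, PySem.Set.contains_eq_listContains,
              List.contains_eq_mem, List.mem_filter, hm]

-- the streaming fold maintains exactly A's parallel-filter state
theorem pvFoldB_state (l : List String) (S : PySem.Set String) :
    l.foldl pvStepB (pvStateOf S) = pvStateOf (l.foldl PySem.Set.add S) := by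
  induction l generalizing S with
  | nil => rfl
  | cons ch t ih => simp only [List.foldl_cons, pvStepB_state, ih]

-- ===== VERDICT (by name: the statement is the Claim_ definition above) =====
theorem analyze_text_spec : Claim_equal_analyze_text := by
  intro text _
  unfold Spec_analyze_text analyze_text analyze_text_alt
  have h0 : (PySem.Set.empty, PySem.Set.empty, PySem.Set.empty, PySem.Set.empty,
      (PySem.Set.empty : PySem.Set String)) = pvStateOf PySem.Set.empty := rfl
  rw [h0, pvFoldB_state]
  have hofl : (text.toList.map (fun c => String.mk [c])).foldl PySem.Set.add PySem.Set.empty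
      = PySem.Set.ofList (text.toList.map (fun c => String.mk [c])) :=
    (PySem.Set.ofList_eq_foldl _).symm
  rw [hofl]
  have hnd : (PySem.Set.ofList (text.toList.map (fun c => String.mk [c]))).Nodup :=
    PySem.Set.nodup_ofList _
  simp only [pvStateOf, PySem.Set.ofList_eq_self_of_nodup _ (hnd.filter _)]
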